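-- pv_equiv track=rewrite | github.com/bjarkemoensted/adventofcode | aoc/aoc_2024/solution12.py | scan_lines
-- ===== SOURCE A (Python) =====
-- from collections import defaultdict
--
-- def scan_lines(region, flip=False):
--     """Iterates over sets of column indices j for a collection of i, j tuples.
--     One set for each row (i) is returned.
--     Rows are assumed to be coherent, e.g. only increments in steps of 1.
--     If flip is True, iterates over rows instead of columns."""
--
--     inds = region
--     if flip:
--         inds = [(j, i) for i, j in inds]
--
--     # Group column inds j by rows
--     d = defaultdict(lambda: set([]))
--     for i, j in inds:
--         d[i].add(j)
--
--     # Ensure there are no gaps in the rows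
--     keys = sorted(d.keys())
--     assert all(keys[i+1] - keys[i] == 1 for i in range(len(keys) - 1))
--
--     for k in keys:
--         yield d[k]
-- ===== SOURCE B (Python) =====
-- def scan_lines(region, flip=False):
--     """Iterates over sets of column indices j for a collection of i, j tuples.
--     One set for each row (i) is returned, in increasing row order.
--     If flip is True, iterates over rows instead of columns."""
--     inds = [(j, i) for i, j in region] if flip else region
--     if not inds:
--         return
--     rows = [i for i, _ in inds]
--     lo, hi = min(rows), max(rows)
--     # contiguity of rows via cardinality instead of sort + adjacent differences
--     assert len(set(rows)) == hi - lo + 1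
--     for k in range(lo, hi + 1):
--         yield {j for i, j in inds if i == k}
-- ===== Notes on version B (the rewrite author's own statement) =====
-- stated objective: alternative
-- what changed: B drops the defaultdict grouping and the sort-plus-adjacent-difference check: it takes min/max of the row indices, asserts contiguity by the closed-form cardinality identity len(set(rows)) == hi-lo+1, and yields each row's set by filtering the pairs for that row over range(lo, hi+1).
import Mathlib
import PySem

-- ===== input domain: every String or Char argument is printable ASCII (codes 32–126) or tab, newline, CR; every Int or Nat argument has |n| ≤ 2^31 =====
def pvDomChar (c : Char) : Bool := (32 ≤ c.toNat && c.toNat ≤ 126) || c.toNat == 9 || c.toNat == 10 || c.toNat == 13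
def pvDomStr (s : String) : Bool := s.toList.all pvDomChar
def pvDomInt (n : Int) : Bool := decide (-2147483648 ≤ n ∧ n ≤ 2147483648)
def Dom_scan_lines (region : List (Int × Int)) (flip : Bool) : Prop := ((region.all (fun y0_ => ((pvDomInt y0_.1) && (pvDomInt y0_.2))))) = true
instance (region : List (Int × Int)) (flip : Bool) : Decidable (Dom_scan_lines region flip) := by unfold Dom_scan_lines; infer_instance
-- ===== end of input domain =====

-- B replaces A's defaultdict grouping and sort-plus-adjacent-difference contiguity check by
-- min/max bounds, a cardinality assert, and a per-row filter over range(lo, hi+1) (alternative decomposition, same results).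


-- ===== PORT A =====
-- the assert is Python's AssertionError on gapped rows; those inputs are excluded by Pre_scan_lines
def scan_lines (region : List (Int × Int)) (flip : Bool) : List (List Int) :=
  let inds := if flip then region.map (fun p => (p.2, p.1)) else region
  let d := inds.foldl
    (fun d p => d.modify p.1 ([] : PySem.Set Int) (fun s => PySem.Set.add s p.2))
    (PySem.Dict.empty : PySem.Dict Int (PySem.Set Int))
  let keys := PySem.List.sorted d.keys (fun x => x)
  keys.map (fun k => d.getD k [])

-- ===== PORT B =====
-- the assert is Python's AssertionError on gapped rows; those inputs are excluded by Pre_scan_lines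
def scan_lines_alt (region : List (Int × Int)) (flip : Bool) : List (List Int) :=
  let inds := if flip then region.map (fun p => (p.2, p.1)) else region
  if inds.isEmpty then []
  else
    let rows := inds.map (fun p => p.1)
    let lo := (PySem.List.min? rows (fun x => x)).getD 0
    let hi := (PySem.List.max? rows (fun x => x)).getD 0
    (PySem.List.pyRange lo (hi + 1)).map
      (fun k => PySem.Set.ofList ((inds.filter (fun p => p.1 == k)).map (fun p => p.2)))

-- ===== PRECONDITION & SPEC =====
-- Pre_ excludes exactly the inputs with a gap in the (possibly flipped) row indices,
-- on which A's assert raises AssertionError (and B's assert raises too).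
def Pre_scan_lines (region : List (Int × Int)) (flip : Bool) : Prop :=
  let rows := if flip then region.map (fun p => p.2) else region.map (fun p => p.1)
  ∀ a ∈ rows, ∀ b ∈ rows, a < b → a + 1 ∈ rows
instance (region : List (Int × Int)) (flip : Bool) : Decidable (Pre_scan_lines region flip) := by unfold Pre_scan_lines; infer_instance

def pvWitness_scan_lines : (List (Int × Int)) × Bool := ([(0, 5), (1, 6), (0, 7)], false)

def Spec_scan_lines (region : List (Int × Int)) (flip : Bool) (out : List (List Int)) : Prop := out = scan_lines_alt region flip
instance (region : List (Int × Int)) (flip : Bool) (out : List (List Int)) : Decidable (Spec_scan_lines region flip out) := by unfold Spec_scan_lines; infer_instance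

-- ===== CLAIM (what is proved, stated in full; the proofs are below) =====
def Claim_equal_scan_lines : Prop := ∀ (region : List (Int × Int)) (flip : Bool), Dom_scan_lines region flip → Pre_scan_lines region flip → Spec_scan_lines region flip (scan_lines region flip)

-- ===== LEMMAS AND PROOFS =====

-- A's grouping fold, read at one key: the set of second components of the pairs whose first component is k
lemma getD_groupFold (l : List (Int × Int)) (d : PySem.Dict Int (PySem.Set Int)) (k : Int) :
    (l.foldl (fun d p => d.modify p.1 ([] : PySem.Set Int) (fun s => PySem.Set.add s p.2)) d).getD k []
      = (l.filter (fun p => p.1 == k)).foldl (fun s p => PySem.Set.add s p.2) (d.getD k []) := by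
  induction l generalizing d with
  | nil => rfl
  | cons p l ih =>
    simp only [List.foldl_cons, List.filter_cons]
    rw [ih]
    by_cases h : p.1 = k
    · simp [h]
    · have : (p.1 == k) = false := by simp [h]
      simp [this, PySem.Dict.getD_modify, Ne.symm h]

-- a Nodup, contiguous list of integers sorts to the closed range from its min to its max
lemma sorted_contig (ks : List Int) (hnd : ks.Nodup) (lo hi : Int)
    (hlom : lo ∈ ks) (hlo : ∀ x ∈ ks, lo ≤ x)
    (hhim : hi ∈ ks) (hhi : ∀ x ∈ ks, x ≤ hi)
    (hc : ∀ a ∈ ks, ∀ b ∈ ks, a < b → a + 1 ∈ ks) :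
    PySem.List.sorted ks (fun x => x) = PySem.List.pyRange lo (hi + 1) := by
  have hstep : ∀ n : Nat, lo + (n : Int) ≤ hi → lo + (n : Int) ∈ ks := by
    intro n
    induction n with
    | zero => intro _; simpa using hlom
    | succ m ih =>
      intro h
      have hm : lo + (m : Int) ≤ hi := by push_cast at h ⊢; omega
      have hmem := ih hm
      have hlt : lo + (m : Int) < hi := by push_cast at h; omega
      have := hc _ hmem _ hhim hlt
      convert this using 1; push_cast; ring
  have hmem : ∀ x : Int, x ∈ ks ↔ lo ≤ x ∧ x ≤ hi := by
    intro x
    constructor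
    · intro hx; exact ⟨hlo x hx, hhi x hx⟩
    · rintro ⟨h1, h2⟩
      have : x = lo + ((x - lo).toNat : Int) := by omega
      rw [this]; exact hstep _ (by omega)
  have hperm : (PySem.List.pyRange lo (hi + 1)).Perm ks := by
    rw [List.perm_ext_iff_of_nodup (PySem.List.nodup_pyRange_one lo (hi + 1)) hnd]
    intro a
    rw [PySem.List.mem_pyRange_one, hmem]
    omega
  exact PySem.List.sorted_eq_of_perm_of_pairwise_lt ks (PySem.List.pyRange lo (hi + 1))
    (fun x => x) hperm (PySem.List.pairwise_lt_pyRange_one lo (hi + 1))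

-- the heart of the proof, stated about the common preprocessed pair list
lemma core_eq (inds : List (Int × Int))
    (hc : ∀ a ∈ inds.map (fun p => p.1), ∀ b ∈ inds.map (fun p => p.1), a < b → a + 1 ∈ inds.map (fun p => p.1)) :
    (PySem.List.sorted
        ((inds.foldl (fun d p => d.modify p.1 ([] : PySem.Set Int) (fun s => PySem.Set.add s p.2))
            (PySem.Dict.empty : PySem.Dict Int (PySem.Set Int))).keys) (fun x => x)).map
      (fun k => (inds.foldl (fun d p => d.modify p.1 ([] : PySem.Set Int) (fun s => PySem.Set.add s p.2))
            (PySem.Dict.empty : PySem.Dict Int (PySem.Set Int))).getD k [])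
      = (if inds.isEmpty then []
         else
           (PySem.List.pyRange (((PySem.List.min? (inds.map (fun p => p.1)) (fun x => x)).getD 0))
               (((PySem.List.max? (inds.map (fun p => p.1)) (fun x => x)).getD 0) + 1)).map
             (fun k => PySem.Set.ofList ((inds.filter (fun p => p.1 == k)).map (fun p => p.2)))) := by
  set rows := inds.map (fun p => p.1) with hrows
  have hkeys : (inds.foldl (fun d p => d.modify p.1 ([] : PySem.Set Int) (fun s => PySem.Set.add s p.2))
      (PySem.Dict.empty : PySem.Dict Int (PySem.Set Int))).keys = PySem.Set.ofList rows := by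
    rw [PySem.Dict.keys_foldl_modify_key inds (fun p => p.1) ([] : PySem.Set Int)
      (fun _ p => fun s => PySem.Set.add s p.2)]
    rw [PySem.Dict.keys_empty, PySem.Set.update_nil_left]
  have hval : ∀ k : Int, (inds.foldl (fun d p => d.modify p.1 ([] : PySem.Set Int) (fun s => PySem.Set.add s p.2))
      (PySem.Dict.empty : PySem.Dict Int (PySem.Set Int))).getD k []
      = PySem.Set.ofList ((inds.filter (fun p => p.1 == k)).map (fun p => p.2)) := by
    intro k
    rw [getD_groupFold]
    rw [← PySem.Set.update_map_eq_foldl_add]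
    simp [PySem.Set.update_nil_left, PySem.Dict.getD_empty]
  by_cases hnil : inds = []
  · subst hnil; simp [PySem.Dict.getD_empty]
  · have hinds : inds.isEmpty = false := by simpa using hnil
    rw [if_neg (by simp [hinds])]
    have hrnil : rows ≠ [] := by simp [hrows, hnil]
    obtain ⟨lo, hlo⟩ : ∃ m, PySem.List.min? rows (fun x => x) = some m := by
      cases h : PySem.List.min? rows (fun x => x) with
      | none => exact absurd ((PySem.List.min?_eq_none_iff rows _).mp h) hrnil
      | some m => exact ⟨m, rfl⟩
    obtain ⟨hi, hhi⟩ : ∃ m, PySem.List.max? rows (fun x => x) = some m := by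
      cases h : PySem.List.max? rows (fun x => x) with
      | none => exact absurd ((PySem.List.max?_eq_none_iff rows _).mp h) hrnil
      | some m => exact ⟨m, rfl⟩
    rw [hkeys, hlo, hhi]
    have hsorted : PySem.List.sorted (PySem.Set.ofList rows) (fun x => x)
        = PySem.List.pyRange lo (hi + 1) := by
      apply sorted_contig _ (PySem.Set.nodup_ofList rows) lo hi
      · exact (PySem.Set.mem_ofList rows lo).mpr (PySem.List.min?_mem hlo)
      · intro x hx; exact PySem.List.min?_isMin hlo x ((PySem.Set.mem_ofList rows x).mp hx)
      · exact (PySem.Set.mem_ofList rows hi).mpr (PySem.List.max?_mem hhi)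
      · intro x hx; exact PySem.List.max?_isMax hhi x ((PySem.Set.mem_ofList rows x).mp hx)
      · intro a ha b hb hab
        rw [PySem.Set.mem_ofList] at ha hb ⊢
        exact hc a ha b hb hab
    rw [hsorted]
    simp only [Option.getD_some]
    exact List.map_congr_left (fun k _ => hval k)

-- ===== VERDICT (by name: the statement is the Claim_ definition above) =====
theorem scan_lines_spec : Claim_equal_scan_lines := by
  intro region flip _hdom hpre
  unfold Spec_scan_lines scan_lines scan_lines_alt
  have hpre' : ∀ a ∈ (if flip then region.map (fun p => (p.2, p.1)) else region).map (fun p => p.1),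
      ∀ b ∈ (if flip then region.map (fun p => (p.2, p.1)) else region).map (fun p => p.1),
      a < b → a + 1 ∈ (if flip then region.map (fun p => (p.2, p.1)) else region).map (fun p => p.1) := by
    unfold Pre_scan_lines at hpre
    cases flip <;> simpa [List.map_map, Function.comp] using hpre
  exact core_eq _ hpre'
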